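-- pv_equiv track=rewrite | github.com/MuteJester/GenAIRR | tests/core/test_simulation_integrity.py | _detect_v_p_nuc
-- ===== SOURCE A (Python) =====
-- _DNA_COMPLEMENT = str.maketrans("ACGTacgt", "TGCAtgca")
--
-- def _rc(s):
--     return s.translate(_DNA_COMPLEMENT)[::-1]
--
-- def _detect_v_p_nuc(np1_region, v_seq):
--     """Return the largest K in [1..4] such that np1_region.upper()[:K]
--     equals the reverse-complement of v_seq[-K:]. 0 if no match."""
--     if not np1_region or not v_seq:
--         return 0
--     np1 = np1_region.upper()
--     for k in (4, 3, 2, 1):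
--         if k <= len(np1) and k <= len(v_seq):
--             if np1[:k] == _rc(v_seq[-k:]):
--                 return k
--     return 0
-- ===== SOURCE B (Python) =====
-- _DNA_COMPLEMENT = str.maketrans("ACGTacgt", "TGCAtgca")
--
--
-- def _detect_v_p_nuc(np1_region, v_seq):
--     """Length of the initial run of positions i where np1_region.upper()[i]
--     equals the complement of v_seq[-1-i]; identical to finding the largest
--     matching K in [1..4]."""
--     if not np1_region or not v_seq:
--         return 0
--     np1 = np1_region.upper()
--     limit = min(4, len(np1), len(v_seq))
--     i = 0
--     while i < limit and np1[i] == v_seq[-1 - i].translate(_DNA_COMPLEMENT):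
--         i += 1
--     return i
-- ===== Notes on version B (the rewrite author's own statement) =====
-- stated objective: simpler
-- what changed: Replaces the four descending per-k comparisons, each rebuilding a reverse-complement string of the suffix, with one forward scan that counts the initial run of positions where np1_region.upper()[i] matches the complement of v_seq[-1-i], breaking at the first mismatch.
import Mathlib
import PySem

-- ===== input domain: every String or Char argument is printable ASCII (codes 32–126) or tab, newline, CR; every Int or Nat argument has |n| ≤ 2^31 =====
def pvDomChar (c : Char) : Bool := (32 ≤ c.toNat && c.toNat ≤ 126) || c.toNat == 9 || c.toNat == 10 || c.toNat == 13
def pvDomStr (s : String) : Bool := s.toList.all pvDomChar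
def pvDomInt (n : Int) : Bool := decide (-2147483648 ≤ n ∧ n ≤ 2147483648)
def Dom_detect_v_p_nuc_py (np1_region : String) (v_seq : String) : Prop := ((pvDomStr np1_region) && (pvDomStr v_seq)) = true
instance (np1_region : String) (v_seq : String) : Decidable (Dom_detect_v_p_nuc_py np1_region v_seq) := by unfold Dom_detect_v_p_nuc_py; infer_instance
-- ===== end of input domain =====

-- B replaces A's four descending full-prefix/reverse-complement comparisons by a single
-- incremental forward scan counting the initial run of matching positions (objective: simpler).

-- ===== PORT A =====
-- str.translate with _DNA_COMPLEMENT = str.maketrans("ACGTacgt", "TGCAtgca") maps the eight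
-- DNA letters and passes every other character through — exact, char for char.
def pvComp (c : Char) : Char :=
  if c = 'A' then 'T' else if c = 'C' then 'G' else if c = 'G' then 'C' else if c = 'T' then 'A'
  else if c = 'a' then 't' else if c = 'c' then 'g' else if c = 'g' then 'c' else if c = 't' then 'a'
  else c

-- _rc: s.translate(_DNA_COMPLEMENT) is a per-char map; s[::-1] via PySem.List.slice?
def pvRc (s : List Char) : List Char :=
  (PySem.List.slice? (s.map pvComp) none none (-1)).getD []

-- the 'for k in (4, 3, 2, 1)' loop with its early return
def pvLoopA (np1 v : List Char) : List Nat → Int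
  | [] => 0
  | k :: ks =>
    if k ≤ np1.length ∧ k ≤ v.length then
      if PySem.List.slice np1 none (some (k : Int)) = pvRc (PySem.List.slice v (some (-(k : Int))) none)
      then (k : Int) else pvLoopA np1 v ks
    else pvLoopA np1 v ks

def detect_v_p_nuc_py (np1_region : String) (v_seq : String) : Int :=
  if np1_region.toList = [] ∨ v_seq.toList = [] then 0
  else pvLoopA (PySem.Chars.upper np1_region.toList) v_seq.toList [4, 3, 2, 1]

-- ===== PORT B =====
-- the 'while i < limit and np1[i] == v_seq[-1-i].translate(_DNA_COMPLEMENT): i += 1' loop;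
-- the short-circuit 'and' guarantees both indexings are in range, so pyGetD's default is never read
def pvWhileB (np1 v : List Char) (limit i : Nat) : Nat :=
  if h : i < limit ∧
      PySem.List.pyGetD np1 (i : Int) ' ' = pvComp (PySem.List.pyGetD v (-1 - (i : Int)) ' ') then
    pvWhileB np1 v limit (i + 1)
  else i
termination_by limit - i
decreasing_by omega

def detect_v_p_nuc_py_alt (np1_region : String) (v_seq : String) : Int :=
  if np1_region.toList = [] ∨ v_seq.toList = [] then 0
  else
    let np1 := PySem.Chars.upper np1_region.toList
    let v := v_seq.toList
    (pvWhileB np1 v (min 4 (min np1.length v.length)) 0 : Int)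

-- ===== PRECONDITION & SPEC =====
def Spec_detect_v_p_nuc_py (np1_region : String) (v_seq : String) (out : Int) : Prop := out = detect_v_p_nuc_py_alt np1_region v_seq
instance (np1_region : String) (v_seq : String) (out : Int) : Decidable (Spec_detect_v_p_nuc_py np1_region v_seq out) := by unfold Spec_detect_v_p_nuc_py; infer_instance

-- ===== CLAIM (what is proved, stated in full; the proofs are below) =====
def Claim_equal_detect_v_p_nuc_py : Prop := ∀ (np1_region : String) (v_seq : String), Dom_detect_v_p_nuc_py np1_region v_seq → Spec_detect_v_p_nuc_py np1_region v_seq (detect_v_p_nuc_py np1_region v_seq)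

-- ===== LEMMAS AND PROOFS =====

def pvM (np1 v : List Char) (j : Nat) : Prop :=
  PySem.List.pyGetD np1 (j : Int) ' ' = pvComp (PySem.List.pyGetD v (-1 - (j : Int)) ' ')

theorem pvWhileB_spec (np1 v : List Char) (limit i : Nat) (hi : i ≤ limit) :
    i ≤ pvWhileB np1 v limit i ∧ pvWhileB np1 v limit i ≤ limit ∧
    (∀ j, i ≤ j → j < pvWhileB np1 v limit i → pvM np1 v j) ∧
    (pvWhileB np1 v limit i < limit → ¬ pvM np1 v (pvWhileB np1 v limit i)) := by
  rw [pvWhileB]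
  by_cases h : i < limit ∧
      PySem.List.pyGetD np1 (i : Int) ' ' = pvComp (PySem.List.pyGetD v (-1 - (i : Int)) ' ')
  · simp only [dif_pos h]
    have ih := pvWhileB_spec np1 v limit (i + 1) h.1
    refine ⟨by omega, ih.2.1, ?_, ih.2.2.2⟩
    intro j hij hjr
    rcases Nat.eq_or_lt_of_le hij with rfl | hlt
    · exact h.2
    · exact ih.2.2.1 j hlt hjr
  · simp only [dif_neg h]
    exact ⟨le_refl i, hi, fun j hij hji => absurd hji (by omega),
      fun hl hm => h ⟨hl, hm⟩⟩
termination_by limit - i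
decreasing_by omega

-- index bridge: for j < lengths, pvM is a getElem equality against c := (v.map pvComp).reverse
theorem pvM_iff (np1 v : List Char) (j : Nat) (hj2 : j < v.length) :
    pvM np1 v j ↔ np1.getD j ' ' = ((v.map pvComp).reverse).getD j ' ' := by
  unfold pvM
  have h1 : PySem.List.pyGetD np1 (j : Int) ' ' = np1.getD j ' ' := by
    simp [PySem.List.pyGetD_natCast]
  have hneg : (-1 - (j : Int)) = -(((j + 1 : Nat)) : Int) := by push_cast; ring
  have h2 : PySem.List.pyGetD v (-1 - (j : Int)) ' ' = v[v.length - 1 - j]'(by omega) := by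
    have h := PySem.List.pyGetD_neg_natCast v (j + 1) ' ' (by omega) (by omega)
    rw [hneg, h]
    congr 1
    omega
  have h3 : ((v.map pvComp).reverse).getD j ' ' = pvComp (v[v.length - 1 - j]'(by omega)) := by
    rw [List.getD_eq_getElem _ _ (by simp; omega)]
    rw [List.getElem_reverse, List.getElem_map]
    congr 2
    simp only [List.length_map]
  rw [h1, h2, h3]

theorem take_eq_iff (a c : List Char) (k : Nat) (ha : k ≤ a.length) (hc : k ≤ c.length) :
    a.take k = c.take k ↔ ∀ j, j < k → a.getD j ' ' = c.getD j ' ' := by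
  constructor
  · intro h j hj
    have h' := congrArg (fun l => l.getD j ' ') h
    simpa [List.getD_eq_getElem?_getD, List.getElem?_take, hj] using h'
  · intro h
    apply List.ext_getElem
    · simp; omega
    · intro j h1 h2
      have hj : j < k := by simp at h1; omega
      have := h j hj
      rw [List.getD_eq_getElem _ _ (by omega), List.getD_eq_getElem _ _ (by omega)] at this
      simpa [List.getElem_take] using this

theorem testA_eq (np1 v : List Char) (k : Nat) (hk : 0 < k) (hkv : k ≤ v.length) :
    (PySem.List.slice np1 none (some (k : Int)) = pvRc (PySem.List.slice v (some (-(k : Int))) none))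
    ↔ np1.take k = ((v.map pvComp).reverse).take k := by
  rw [PySem.List.slice_to_natCast]
  have h := PySem.List.slice_from_neg_natCast (xs := v) (k := k) hk
  rw [h]
  unfold pvRc
  rw [PySem.List.slice?_none_none_neg_one]
  simp only [Option.getD_some]
  have he : ((v.drop (v.length - k)).map pvComp).reverse = ((v.map pvComp).reverse).take k := by
    rw [List.map_drop, List.reverse_drop]
    simp
    omega
  rw [he]

theorem detect_key (a v : List Char) (L : Nat) (hL : L = min 4 (min a.length v.length))
    (k : Nat) (hk0 : 0 < k) (hk4 : k ≤ 4) :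
    ((k ≤ a.length ∧ k ≤ v.length) ∧
      PySem.List.slice a none (some (k : Int)) = pvRc (PySem.List.slice v (some (-(k : Int))) none))
    ↔ k ≤ pvWhileB a v L 0 := by
  obtain ⟨-, hrL, hall, hstop⟩ := pvWhileB_spec a v L 0 (by omega)
  set r := pvWhileB a v L 0 with hrdef
  constructor
  · rintro ⟨⟨hkn, hkm⟩, htest⟩
    rw [testA_eq a v k hk0 hkm, take_eq_iff a _ k hkn (by simp; omega)] at htest
    by_contra hlt
    have hrL' : r < L := by omega
    exact hstop hrL' ((pvM_iff a v r (by omega)).2 (htest r (by omega)))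
  · intro hkr
    have hkL : k ≤ L := le_trans hkr hrL
    refine ⟨⟨by omega, by omega⟩, ?_⟩
    rw [testA_eq a v k hk0 (by omega), take_eq_iff a _ k (by omega) (by simp; omega)]
    intro j hj
    exact (pvM_iff a v j (by omega)).1 (hall j (by omega) (by omega))

theorem if_nest {g t : Prop} [Decidable g] [Decidable t] (x y : Int) :
    (if g then if t then x else y else y) = if g ∧ t then x else y := by
  by_cases hg : g <;> by_cases ht : t <;> simp [hg, ht]

theorem loop_eq_while (a v : List Char) (L : Nat) (hL : L = min 4 (min a.length v.length)) :
    pvLoopA a v [4, 3, 2, 1] = ((pvWhileB a v L 0 : Nat) : Int) := by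
  have hr4 : pvWhileB a v L 0 ≤ 4 := le_trans (pvWhileB_spec a v L 0 (by omega)).2.1 (by omega)
  have k4 := detect_key a v L hL 4 (by omega) (by omega)
  have k3 := detect_key a v L hL 3 (by omega) (by omega)
  have k2 := detect_key a v L hL 2 (by omega) (by omega)
  have k1 := detect_key a v L hL 1 (by omega) (by omega)
  simp only [pvLoopA, if_nest]
  rw [if_congr k4 rfl rfl, if_congr k3 rfl rfl, if_congr k2 rfl rfl, if_congr k1 rfl rfl]
  split_ifs <;> omega

theorem detect_main (np1_region : String) (v_seq : String) :
    detect_v_p_nuc_py np1_region v_seq = detect_v_p_nuc_py_alt np1_region v_seq := by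
  unfold detect_v_p_nuc_py detect_v_p_nuc_py_alt
  by_cases hg : np1_region.toList = [] ∨ v_seq.toList = []
  · rw [if_pos hg, if_pos hg]
  · rw [if_neg hg, if_neg hg]
    exact loop_eq_while _ _ _ rfl

-- ===== VERDICT (by name: the statement is the Claim_ definition above) =====
theorem detect_v_p_nuc_py_spec : Claim_equal_detect_v_p_nuc_py := by
  intro np1_region v_seq _
  unfold Spec_detect_v_p_nuc_py
  exact detect_main np1_region v_seq
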